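-- pv_equiv track=rewrite | github.com/hbldh/AdventOfCode | AOC2017/day10.py | part_1
-- ===== SOURCE A (Python) =====
-- from collections import deque
--
-- def part_1(lengths, size=256):
--     skip_size = 0
--     position = 0
--     d = deque(range(size))
--     for l in lengths:
--         for v in [d.popleft() for x in range(l)]:
--             d.appendleft(v)
--         d.rotate(-(l + skip_size))
--         position = (position + l + skip_size) % size
--         skip_size += 1
--     d.rotate(position)
--     return list(d)
-- ===== SOURCE B (Python) =====
-- def part_1(lengths, size=256):
--     d = list(range(size))
--     pos = 0
--     skip = 0
--     for l in lengths:
--         if 0 < l: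
--             if pos + l <= size:
--                 d[pos:pos + l] = d[pos:pos + l][::-1]
--             else:
--                 seg = (d[pos:] + d[:pos + l - size])[::-1]
--                 k = size - pos
--                 d[pos:] = seg[:k]
--                 d[:pos + l - size] = seg[k:]
--         pos = (pos + l + skip) % size
--         skip += 1
--     return d
-- ===== Notes on version B (the rewrite author's own statement) =====
-- stated objective: faster
-- what changed: Replaced the rotating-deque representation (pop/re-append the first l elements plus an O(size) deque rotation after every length and a final re-rotation) by a fixed array indexed absolutely: each length reverses one l-element segment in place with wraparound via slice assignment, and the list is returned directly with no rotations.
import Mathlib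
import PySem

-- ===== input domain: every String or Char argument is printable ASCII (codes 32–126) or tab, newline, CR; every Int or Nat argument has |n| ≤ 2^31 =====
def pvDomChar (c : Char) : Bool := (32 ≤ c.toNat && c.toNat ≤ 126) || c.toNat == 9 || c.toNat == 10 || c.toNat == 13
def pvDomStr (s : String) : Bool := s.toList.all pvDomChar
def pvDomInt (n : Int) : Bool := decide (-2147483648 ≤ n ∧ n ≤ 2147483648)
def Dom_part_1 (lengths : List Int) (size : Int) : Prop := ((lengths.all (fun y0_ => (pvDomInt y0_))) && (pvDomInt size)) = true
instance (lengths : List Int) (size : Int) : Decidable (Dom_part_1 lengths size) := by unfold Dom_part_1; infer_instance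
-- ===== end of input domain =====

-- B replaces A's rotating deque with a fixed array mutated by wraparound slice reversal, dropping
-- A's per-step deque rotations and final re-rotation; measured faster in a timing run.

-- ===== PORT A =====

-- d.rotate(n): right rotation by n (any Int n; Python's deque.rotate reduces n modulo len; no-op on [])
def pyDequeRotate (d : List Int) (n : Int) : List Int :=
  if d.length = 0 then d
  else
    let k := (PySem.Int.mod n (d.length : Int)).toNat
    d.drop (d.length - k) ++ d.take (d.length - k)

def stepA (size : Int) (st : Int × Int × List Int) (l : Int) : Int × Int × List Int :=
  let skip := st.1
  let pos := st.2.1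
  let d := st.2.2
  -- [d.popleft() for x in range(l)] pops the first l elements (IndexError when l > len(d): outside Pre_)
  let popped := d.take l.toNat
  let rest := d.drop l.toNat
  -- for v in popped: d.appendleft(v)
  let d2 := popped.foldl (fun acc v => v :: acc) rest
  let d3 := pyDequeRotate d2 (-(l + skip))
  (skip + 1, PySem.Int.mod (pos + l + skip) size, d3)

def part_1 (lengths : List Int) (size : Int) : List Int :=
  let st := lengths.foldl (stepA size) (0, 0, PySem.List.pyRange 0 size 1)
  pyDequeRotate st.2.2 st.2.1

-- ===== PORT B =====

def stepB (size : Int) (st : List Int × Int × Int) (l : Int) : List Int × Int × Int :=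
  let d := st.1
  let pos := st.2.1
  let skip := st.2.2
  let d2 :=
    if 0 < l then
      if pos + l ≤ size then
        -- d[pos:pos+l] = d[pos:pos+l][::-1]  (replace the slice [pos,pos+l) by its reverse)
        PySem.List.slice d none (some pos) ++ (PySem.List.slice d (some pos) (some (pos + l))).reverse
          ++ PySem.List.slice d (some (pos + l)) none
      else
        let seg := (PySem.List.slice d (some pos) none
                     ++ PySem.List.slice d none (some (pos + l - size))).reverse
        let k := size - pos
        -- d[pos:] = seg[:k]
        let d1 := PySem.List.slice d none (some pos) ++ PySem.List.slice seg none (some k)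
        -- d[:pos+l-size] = seg[k:]
        PySem.List.slice seg (some k) none ++ PySem.List.slice d1 (some (pos + l - size)) none
    else d
  (d2, PySem.Int.mod (pos + l + skip) size, skip + 1)

def part_1_alt (lengths : List Int) (size : Int) : List Int :=
  (lengths.foldl (stepB size) (PySem.List.pyRange 0 size 1, 0, 0)).1

-- ===== PRECONDITION & SPEC =====
-- A raises IndexError (deque.popleft from a too-short deque) when some length exceeds size, and
-- ZeroDivisionError (`% size`) when size = 0 with nonempty lengths; Pre_ excludes exactly the
-- raising inputs and keeps every input on which A returns (including size ≤ 0 degenerate cases).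
def Pre_part_1 (lengths : List Int) (size : Int) : Prop :=
  (1 ≤ size ∧ ∀ l ∈ lengths, l ≤ size)
    ∨ (size < 0 ∧ ∀ l ∈ lengths, l ≤ 0)
    ∨ (size = 0 ∧ lengths = [])
instance (lengths : List Int) (size : Int) : Decidable (Pre_part_1 lengths size) := by
  unfold Pre_part_1; infer_instance

def pvWitness_part_1 : List Int × Int := ([3, 4, 1, 5], 5)

def Spec_part_1 (lengths : List Int) (size : Int) (out : List Int) : Prop := out = part_1_alt lengths size
instance (lengths : List Int) (size : Int) (out : List Int) : Decidable (Spec_part_1 lengths size out) := by unfold Spec_part_1; infer_instance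

-- ===== CLAIM (what is proved, stated in full; the proofs are below) =====
def Claim_equal_part_1 : Prop := ∀ (lengths : List Int) (size : Int), Dom_part_1 lengths size → Pre_part_1 lengths size → Spec_part_1 lengths size (part_1 lengths size)

-- ===== LEMMAS AND PROOFS =====

theorem foldl_cons_rev (popped rest : List Int) :
    popped.foldl (fun acc v => v :: acc) rest = popped.reverse ++ rest := by
  induction popped generalizing rest with
  | nil => simp
  | cons a t ih => simp [List.foldl_cons, ih]

theorem rotate_congr (arr : List Int) (a b : Nat) (h : a % arr.length = b % arr.length) :
    arr.rotate a = arr.rotate b := by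
  rw [← List.rotate_mod, h, List.rotate_mod]

theorem pyDequeRotate_eq (d : List Int) (m : Int) (hd : d.length ≠ 0) :
    pyDequeRotate d m = d.rotate (d.length - (PySem.Int.mod m (d.length : Int)).toNat) := by
  have hlen : (0 : Int) < (d.length : Int) := by omega
  have hm := PySem.Int.mod_lt m hlen
  have hm0 := PySem.Int.mod_nonneg m hlen
  rw [List.rotate_eq_drop_append_take (by omega)]
  simp [pyDequeRotate, hd]

-- the degenerate cases: with size ≤ 0 the list stays empty on both sides
theorem stepA_empty (size : Int) (ls : List Int) (skip pos : Int) :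
    (ls.foldl (stepA size) (skip, pos, ([] : List Int))).2.2 = [] := by
  induction ls generalizing skip pos with
  | nil => rfl
  | cons a t ih => simpa [stepA, pyDequeRotate] using ih (skip + 1) (PySem.Int.mod (pos + a + skip) size)

theorem stepB_empty (size : Int) (ls : List Int) (pos skip : Int) (h : ∀ l ∈ ls, l ≤ 0) :
    (ls.foldl (stepB size) (([] : List Int), pos, skip)).1 = [] := by
  induction ls generalizing pos skip with
  | nil => rfl
  | cons a t ih =>
    have ha : ¬ (0 < a) := by have := h a (by simp); omega
    simpa [stepB, ha] using ih _ _ (fun l hl => h l (by simp [hl]))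

-- pure list facts: in-place reversal of a (possibly wrapping) segment, seen through a rotation
theorem core1 (a b c : List Int) :
    (((a ++ b ++ c).rotate a.length).take b.length).reverse
        ++ ((a ++ b ++ c).rotate a.length).drop b.length
      = (a ++ b.reverse ++ c).rotate a.length := by
  rw [List.rotate_eq_drop_append_take (by simp), List.rotate_eq_drop_append_take (by simp)]
  simp [List.append_assoc]

theorem core2a (a b c : List Int) :
    ((((a ++ b ++ c).rotate (a.length + b.length)).take (c.length + a.length)).reverse
        ++ ((a ++ b ++ c).rotate (a.length + b.length)).drop (c.length + a.length))
      = (c ++ a).reverse ++ b := by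
  rw [List.rotate_eq_drop_append_take (by simp)]
  simp [List.append_assoc, List.take_append, List.drop_append,
    List.take_of_length_le, List.drop_of_length_le]

theorem core2b (a b seg : List Int) (K : Nat) (hK : K ≤ seg.length) :
    ((seg.drop K ++ ((a ++ (b ++ seg.take K)).drop a.length)).rotate (seg.length - K + b.length))
      = seg ++ b := by
  rw [List.rotate_eq_drop_append_take (by simp)]
  simp [List.append_assoc, List.take_append, List.drop_append]
  have h1 : List.drop (K + (seg.length - K + b.length)) seg = [] := List.drop_of_length_le (by omega)
  have h2 : List.take (seg.length - K + b.length) (List.drop K seg) = List.drop K seg :=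
    List.take_of_length_le (by simp)
  rw [h1, h2]
  simp [← List.append_assoc]

-- core: reversing the first l of (arr rotated by pos) = rotating B's slice-reversed arr by pos
theorem seg_reverse_eq (size : Int) (arr : List Int) (pos skip l : Int)
    (harr : arr.length = size.toNat) (hpos0 : 0 ≤ pos) (hpos : pos < size) (hl0 : 0 < l) (hl : l ≤ size) :
    ((arr.rotate pos.toNat).take l.toNat).reverse ++ (arr.rotate pos.toNat).drop l.toNat
      = (stepB size (arr, pos, skip) l).1.rotate pos.toNat := by
  simp only [stepB, if_pos hl0]
  by_cases hcase : pos + l ≤ size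
  · rw [if_pos hcase]
    rw [PySem.List.slice_to arr hpos0, PySem.List.slice_toNat arr hpos0 (by omega),
        PySem.List.slice_from arr (by omega : (0:Int) ≤ pos + l)]
    have hLL : (pos + l).toNat - pos.toNat = l.toNat := by omega
    have hPL : (pos + l).toNat = pos.toNat + l.toNat := by omega
    rw [hLL, hPL]
    have ha : (arr.take pos.toNat).length = pos.toNat := by
      rw [List.length_take]; omega
    have hb : ((arr.drop pos.toNat).take l.toNat).length = l.toNat := by
      rw [List.length_take, List.length_drop]; omega
    have key := core1 (arr.take pos.toNat) ((arr.drop pos.toNat).take l.toNat)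
      (arr.drop (pos.toNat + l.toNat))
    rw [ha, hb] at key
    have hsplit : arr.take pos.toNat ++ (arr.drop pos.toNat).take l.toNat
        ++ arr.drop (pos.toNat + l.toNat) = arr := by
      have hdd : arr.drop (pos.toNat + l.toNat) = (arr.drop pos.toNat).drop l.toNat := by
        rw [List.drop_drop]
      rw [List.append_assoc, hdd, List.take_append_drop, List.take_append_drop]
    rw [hsplit] at key
    exact key
  · rw [if_neg hcase]
    rw [PySem.List.slice_from arr hpos0, PySem.List.slice_to arr (by omega : (0:Int) ≤ pos + l - size),
        PySem.List.slice_to arr hpos0,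
        PySem.List.slice_to _ (by omega : (0:Int) ≤ size - pos),
        PySem.List.slice_from _ (by omega : (0:Int) ≤ size - pos),
        PySem.List.slice_from _ (by omega : (0:Int) ≤ pos + l - size)]
    set M := (pos + l - size).toNat with hM
    set K := (size - pos).toNat with hK
    set p := pos.toNat with hp
    set seg := (arr.drop p ++ arr.take M).reverse with hseg
    have hMp : M ≤ p := by omega
    have hsegl : seg.length = K + M := by simp [hseg]; omega
    have ha : (arr.take M).length = M := by simp; omega
    have hb : ((arr.take p).drop M).length = p - M := by simp; omega
    have hc : (arr.drop p).length = K := by simp; omega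
    have hab : arr.take M ++ (arr.take p).drop M = arr.take p := by
      have : arr.take M = (arr.take p).take M := by rw [List.take_take]; congr 1; omega
      rw [this, List.take_append_drop]
    have hsplit : arr.take M ++ (arr.take p).drop M ++ arr.drop p = arr := by
      rw [hab, List.take_append_drop]
    have key1 := core2a (arr.take M) ((arr.take p).drop M) (arr.drop p)
    rw [ha, hb, hc, hsplit] at key1
    have e1 : M + (p - M) = p := by omega
    have e2 : K + M = l.toNat := by omega
    rw [e1, e2] at key1
    rw [key1]
    have key2 := core2b (arr.take M) ((arr.take p).drop M) seg K (by omega)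
    rw [ha, hb, hsegl] at key2
    have e3 : K + M - K + (p - M) = p := by omega
    rw [e3] at key2
    have e4 : arr.take M ++ ((arr.take p).drop M ++ seg.take K) = arr.take p ++ seg.take K := by
      rw [← List.append_assoc, hab]
    rw [e4] at key2
    rw [show (List.drop p arr ++ List.take M arr).reverse = seg from hseg.symm]
    exact key2.symm

theorem emod_key (size pos l skip : Int) :
    (pos + (size - (-(l + skip)) % size)) % size = (pos + l + skip) % size := by
  have h1 : (-(l + skip)) % size = -(l + skip) - size * ((-(l + skip)) / size) := Int.emod_def _ _
  rw [h1]
  have h2 : pos + (size - (-(l + skip) - size * ((-(l + skip)) / size)))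
      = (pos + l + skip) + size * (1 + (-(l + skip)) / size) := by ring
  rw [h2, Int.add_mul_emod_self_left]

-- one full loop step preserves the deque-vs-array correspondence
theorem step_eq (size : Int) (hsize : 1 ≤ size) (arr : List Int) (pos skip l : Int)
    (harr : arr.length = size.toNat) (hpos0 : 0 ≤ pos) (hpos : pos < size) (hl : l ≤ size) :
    (stepA size (skip, pos, arr.rotate pos.toNat) l).2.2
      = (stepB size (arr, pos, skip) l).1.rotate
          ((stepA size (skip, pos, arr.rotate pos.toNat) l).2.1).toNat
    ∧ (stepA size (skip, pos, arr.rotate pos.toNat) l).2.1 = (stepB size (arr, pos, skip) l).2.1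
    ∧ (stepB size (arr, pos, skip) l).1.length = size.toNat := by
  have hdlen : (arr.rotate pos.toNat).length = size.toNat := by simp [harr]
  have hd2 : ((arr.rotate pos.toNat).take l.toNat).reverse ++ (arr.rotate pos.toNat).drop l.toNat
      = (stepB size (arr, pos, skip) l).1.rotate pos.toNat := by
    by_cases hl0 : 0 < l
    · exact seg_reverse_eq size arr pos skip l harr hpos0 hpos hl0 hl
    · have hlz : l.toNat = 0 := by omega
      simp only [stepB, if_neg hl0, hlz, List.take_zero, List.drop_zero, List.reverse_nil,
        List.nil_append]
  have harr2 : (stepB size (arr, pos, skip) l).1.length = size.toNat := by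
    have hlen := congrArg List.length hd2
    simp only [List.length_append, List.length_reverse, List.length_take, List.length_drop,
      List.length_rotate] at hlen
    omega
  refine ⟨?_, rfl, harr2⟩
  simp only [stepA]
  rw [foldl_cons_rev, hd2]
  rw [pyDequeRotate_eq _ _ (by simp [harr2]; omega)]
  simp only [List.length_rotate, List.rotate_rotate, harr2]
  have hcast : ((size.toNat : Int)) = size := by omega
  rw [hcast]
  apply rotate_congr
  rw [harr2]
  have q1lt := PySem.Int.mod_lt (-(l + skip)) (by omega : (0:Int) < size)
  have q1n := PySem.Int.mod_nonneg (-(l + skip)) (by omega : (0:Int) < size)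
  have q1e := PySem.Int.mod_eq_emod_of_pos (a := -(l + skip)) (by omega : (0:Int) < size)
  have q2lt := PySem.Int.mod_lt (pos + l + skip) (by omega : (0:Int) < size)
  have q2n := PySem.Int.mod_nonneg (pos + l + skip) (by omega : (0:Int) < size)
  have q2e := PySem.Int.mod_eq_emod_of_pos (a := pos + l + skip) (by omega : (0:Int) < size)
  rw [q1e, q2e]
  have h1 : ((-(l + skip)) % size).toNat ≤ size.toNat := by omega
  zify [h1]
  rw [Int.toNat_of_nonneg (by omega : (0:Int) ≤ (-(l + skip)) % size),
      Int.toNat_of_nonneg (by omega : (0:Int) ≤ (pos + l + skip) % size),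
      Int.toNat_of_nonneg (by omega : (0:Int) ≤ pos), hcast]
  rw [emod_key size pos l skip]
  rw [Int.emod_emod_of_dvd _ (dvd_refl size)]

-- the loop invariant: A's deque is B's array rotated by the (shared) current position
theorem loop_inv (size : Int) (hsize : 1 ≤ size) (ls : List Int) (hls : ∀ l ∈ ls, l ≤ size)
    (arr : List Int) (pos skip : Int)
    (harr : arr.length = size.toNat) (hpos0 : 0 ≤ pos) (hpos : pos < size) :
    (ls.foldl (stepA size) (skip, pos, arr.rotate pos.toNat)).2.2
      = (ls.foldl (stepB size) (arr, pos, skip)).1.rotate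
          ((ls.foldl (stepA size) (skip, pos, arr.rotate pos.toNat)).2.1).toNat
    ∧ (ls.foldl (stepA size) (skip, pos, arr.rotate pos.toNat)).2.1
        = (ls.foldl (stepB size) (arr, pos, skip)).2.1
    ∧ (ls.foldl (stepB size) (arr, pos, skip)).1.length = size.toNat
    ∧ 0 ≤ (ls.foldl (stepB size) (arr, pos, skip)).2.1
    ∧ (ls.foldl (stepB size) (arr, pos, skip)).2.1 < size := by
  induction ls generalizing arr pos skip with
  | nil =>
    exact ⟨by simp, rfl, harr, hpos0, hpos⟩
  | cons a t ih =>
    have ha : a ≤ size := hls a (by simp)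
    have hstep := step_eq size hsize arr pos skip a harr hpos0 hpos ha
    have hpos2n := PySem.Int.mod_nonneg (pos + a + skip) (by omega : (0:Int) < size)
    have hpos2lt := PySem.Int.mod_lt (pos + a + skip) (by omega : (0:Int) < size)
    have hA : stepA size (skip, pos, arr.rotate pos.toNat) a
        = (skip + 1, PySem.Int.mod (pos + a + skip) size,
            (stepB size (arr, pos, skip) a).1.rotate (PySem.Int.mod (pos + a + skip) size).toNat) := by
      have h1 := hstep.1
      simp only [stepA] at h1 ⊢
      rw [h1]
    have hB : stepB size (arr, pos, skip) a
        = ((stepB size (arr, pos, skip) a).1, PySem.Int.mod (pos + a + skip) size, skip + 1) := rfl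
    rw [List.foldl_cons, List.foldl_cons, hA, hB]
    exact ih (fun l hl => hls l (by simp [hl])) _ _ _ hstep.2.2 hpos2n hpos2lt

-- ===== VERDICT (by name: the statement is the Claim_ definition above) =====
theorem part_1_spec : Claim_equal_part_1 := by
  intro lengths size _ hpre
  show part_1 lengths size = part_1_alt lengths size
  have hA : part_1 lengths size
      = pyDequeRotate ((lengths.foldl (stepA size) (0, 0, PySem.List.pyRange 0 size 1)).2.2)
          ((lengths.foldl (stepA size) (0, 0, PySem.List.pyRange 0 size 1)).2.1) := rfl
  have hB : part_1_alt lengths size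
      = (lengths.foldl (stepB size) (PySem.List.pyRange 0 size 1, 0, 0)).1 := rfl
  rw [hA, hB]
  rcases hpre with ⟨hsize, hls⟩ | ⟨hneg, hls⟩ | ⟨h0, hnil⟩
  · have harr0 : (PySem.List.pyRange 0 size 1).length = size.toNat := by
      rw [PySem.List.length_pyRange_one]; omega
    have hinv := loop_inv size hsize lengths hls (PySem.List.pyRange 0 size 1) 0 0 harr0
      le_rfl (by omega)
    obtain ⟨hd, hpos, hlen, hq0, hqlt⟩ := hinv
    simp only [Int.toNat_zero, List.rotate_zero] at hd hpos
    rw [hpos] at hd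
    rw [hd, hpos]
    set q := (lengths.foldl (stepB size) (PySem.List.pyRange 0 size 1, 0, 0)).2.1 with hq
    set arrF := (lengths.foldl (stepB size) (PySem.List.pyRange 0 size 1, 0, 0)).1 with harrF
    rw [pyDequeRotate_eq _ _ (by simp [hlen]; omega)]
    simp only [List.length_rotate, hlen]
    have hcast : ((size.toNat : Int)) = size := by omega
    rw [hcast]
    have hmq : PySem.Int.mod q size = q := by
      rw [PySem.Int.mod_eq_emod_of_pos (by omega : (0:Int) < size)]
      exact Int.emod_eq_of_lt hq0 hqlt
    rw [hmq, List.rotate_rotate]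
    have hsum : q.toNat + (size.toNat - q.toNat) = size.toNat := by omega
    rw [hsum, ← hlen, List.rotate_length]
  · rw [PySem.List.pyRange_one_eq_nil (by omega)]
    rw [stepA_empty size lengths 0 0]
    rw [stepB_empty size lengths 0 0 hls]
    rfl
  · subst h0 hnil
    rfl
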